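-- pv_equiv track=rewrite | github.com/MarcusLassila/MIA-audit-GNN | src/evaluation.py | inclusions
-- ===== SOURCE A (Python) =====
-- from itertools import combinations
--
-- def inclusions(list_of_sets):
--     n = len(list_of_sets)
--     res = []
--     for r in range(1, n + 1):
--         for idx in combinations(range(n), r):
--             incl = set()
--             excl = set()
--             for i in range(n):
--                 if i in idx:
--                     incl.update(list_of_sets[i])
--                 else:
--                     excl.update(list_of_sets[i])
--             res.append(len(incl - excl))
--     return res
-- ===== SOURCE B (Python) =====
-- from itertools import combinations
--
-- def inclusions(list_of_sets):
--     n = len(list_of_sets)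
--     # one pass over the data: bitmask of which sets contain each element
--     mask = {}
--     for i, s in enumerate(list_of_sets):
--         bit = 1 << i
--         for x in s:
--             mask[x] = mask.get(x, 0) | bit
--     # histogram of membership masks
--     cnt = {}
--     for m in mask.values():
--         cnt[m] = cnt.get(m, 0) + 1
--     res = []
--     for r in range(1, n + 1):
--         for idx in combinations(range(n), r):
--             S = 0
--             for i in idx:
--                 S |= 1 << i
--             total = 0
--             for m, c in cnt.items():
--                 if m & S == m:  # element's sets all inside idx (and mask is never 0)
--                     total += c
--             res.append(total)
--     return res
-- ===== Notes on version B (the rewrite author's own statement) =====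
-- stated objective: faster
-- what changed: Instead of rebuilding incl/excl set unions from scratch for every one of the 2^n-1 subsets, B makes one pass over the data to give each distinct element a bitmask of the sets containing it, histograms those masks, and answers each subset query S by summing the counts of masks contained in S.
import Mathlib
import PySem

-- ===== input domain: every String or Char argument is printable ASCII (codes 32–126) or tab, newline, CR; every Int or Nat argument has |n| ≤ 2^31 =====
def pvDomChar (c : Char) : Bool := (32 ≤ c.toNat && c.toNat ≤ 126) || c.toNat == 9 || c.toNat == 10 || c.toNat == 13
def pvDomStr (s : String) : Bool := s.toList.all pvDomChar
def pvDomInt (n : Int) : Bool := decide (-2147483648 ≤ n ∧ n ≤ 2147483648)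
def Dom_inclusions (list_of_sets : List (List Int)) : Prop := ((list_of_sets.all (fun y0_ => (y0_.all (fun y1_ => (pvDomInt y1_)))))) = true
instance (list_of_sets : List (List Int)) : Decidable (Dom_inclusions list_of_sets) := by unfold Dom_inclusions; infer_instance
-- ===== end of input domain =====

-- B replaces A's per-subset set unions by a one-pass per-element membership bitmask plus a
-- mask histogram queried per subset (objective: faster; measured).

-- ===== PORT A =====
-- literal port of A: for each r, for each combination idx, rebuild incl/excl by a pass
-- over range(n) doing set.update, then append len(incl - excl).
def inclusions (list_of_sets : List (List Int)) : List Int :=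
  let n : Int := PySem.List.len list_of_sets
  (PySem.List.pyRange 1 (n + 1)).foldl (fun res r =>
    -- r comes from range(1, n+1) so r ≥ 1; .toNat is exact here
    (PySem.List.combinations (PySem.List.pyRange 0 n) r.toNat).foldl (fun res idx =>
      let p := (PySem.List.pyRange 0 n).foldl
        (fun (p : PySem.Set Int × PySem.Set Int) i =>
          if i ∈ idx then
            (PySem.Set.update p.1 (PySem.List.pyGetD list_of_sets i []), p.2)
          else
            (p.1, PySem.Set.update p.2 (PySem.List.pyGetD list_of_sets i [])))
        (PySem.Set.empty, PySem.Set.empty)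
      res ++ [PySem.Set.len (PySem.Set.diff p.1 p.2)]) res) []

-- ===== PORT B =====
-- helper: Python's 1 << i (i ≥ 0 everywhere it is used)
def pvShl1 (i : Int) : Int := (1 : Int) <<< i.toNat

-- literal port of Source B: mask = dict element ↦ bitmask of the sets containing it; cnt = histogram
-- of the masks; per subset, S = or of 1 << i for i in idx, total = sum of cnt over m with m & S == m.
def inclusions_alt (list_of_sets : List (List Int)) : List Int :=
  let n : Int := PySem.List.len list_of_sets
  let mask : PySem.Dict Int Int :=
    (PySem.List.enumerate list_of_sets).foldl
      (fun d is =>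
        -- enumerate indices are ≥ 0, so .toNat in 1 << i is exact
        let bit : Int := pvShl1 is.1
        is.2.foldl (fun d x => d.insert x (PySem.Int.bor (d.getD x 0) bit)) d)
      PySem.Dict.empty
  let cnt : PySem.Dict Int Int :=
    mask.values.foldl (fun c m => c.insert m (c.getD m 0 + 1)) PySem.Dict.empty
  (PySem.List.pyRange 1 (n + 1)).foldl (fun res r =>
    (PySem.List.combinations (PySem.List.pyRange 0 n) r.toNat).foldl (fun res idx =>
      let S : Int := idx.foldl (fun S i => PySem.Int.bor S (pvShl1 i)) 0
      let total : Int := cnt.items.foldl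
        (fun acc mc => if PySem.Int.band mc.1 S = mc.1 then acc + mc.2 else acc) 0
      res ++ [total]) res) []

-- ===== PRECONDITION & SPEC =====
def Spec_inclusions (list_of_sets : List (List Int)) (out : List Int) : Prop := out = inclusions_alt list_of_sets
instance (list_of_sets : List (List Int)) (out : List Int) : Decidable (Spec_inclusions list_of_sets out) := by unfold Spec_inclusions; infer_instance

-- ===== CLAIM (what is proved, stated in full; the proofs are below) =====
def Claim_equal_inclusions : Prop := ∀ (list_of_sets : List (List Int)), Dom_inclusions list_of_sets → Spec_inclusions list_of_sets (inclusions list_of_sets)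

-- ===== LEMMAS AND PROOFS =====
def pvMval : List (List Int) → Nat → Int → Nat
  | [], _, _ => 0
  | s :: t, i, x => (if x ∈ s then 1 <<< i else 0) ||| pvMval t (i + 1) x
def pvOrM (idx : List Int) : Nat := idx.foldr (fun i m => (1 <<< i.toNat) ||| m) 0

theorem pv_testBit_mval (t : List (List Int)) (i : Nat) (x : Int) (j : Nat) :
    (pvMval t i x).testBit j = true ↔ ∃ k, k < t.length ∧ j = i + k ∧ x ∈ t.getD k [] := by
  induction t generalizing i with
  | nil => simp [pvMval]
  | cons s t ih =>
    simp only [pvMval, Nat.testBit_or, Bool.or_eq_true, ih]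
    constructor
    · rintro (h | ⟨k, hk, rfl, hm⟩)
      · by_cases hx : x ∈ s
        · simp only [hx, if_true, Nat.shiftLeft_eq, one_mul, Nat.testBit_two_pow] at h
          have hij : i = j := of_decide_eq_true h
          exact ⟨0, by simp, by omega, by simpa using hx⟩
        · simp [hx] at h
      · exact ⟨k + 1, by simp; omega, by omega, by simpa using hm⟩
    · rintro ⟨k, hk, rfl, hm⟩
      cases k with
      | zero =>
        left
        simp only [List.getD_cons_zero] at hm
        simp [hm, Nat.shiftLeft_eq]
      | succ k =>
        right
        exact ⟨k, by simp at hk; omega, by omega, by simpa using hm⟩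

theorem pv_testBit_orM (idx : List Int) (h : ∀ i ∈ idx, 0 ≤ i) (j : Nat) :
    (pvOrM idx).testBit j = true ↔ (j : Int) ∈ idx := by
  induction idx with
  | nil => simp [pvOrM]
  | cons i t ih =>
    have hi : 0 ≤ i := h i (by simp)
    simp only [pvOrM, List.foldr_cons, Nat.testBit_or, Bool.or_eq_true] at *
    rw [ih (fun x hx => h x (by simp [hx]))]
    simp only [Nat.shiftLeft_eq, one_mul, Nat.testBit_two_pow, List.mem_cons]
    constructor
    · rintro (hd | hm)
      · have := of_decide_eq_true hd; left; omega
      · right; exact hm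
    · rintro (rfl | hm)
      · left; exact decide_eq_true (by omega)
      · right; exact hm

theorem pv_and_eq_self_iff (a b : Nat) :
    a &&& b = a ↔ ∀ j, a.testBit j = true → b.testBit j = true := by
  constructor
  · intro h j hj
    have := congrArg (fun z => z.testBit j) h
    simp only [Nat.testBit_and, hj, Bool.true_and] at this
    exact this
  · intro h
    apply Nat.eq_of_testBit_eq
    intro j
    simp only [Nat.testBit_and]
    by_cases hj : a.testBit j = true
    · simp [hj, h j hj]
    · simp [Bool.eq_false_iff.mpr hj]

theorem pv_pyShl1 (i : Int) : pvShl1 i = ((1 <<< i.toNat : Nat) : Int) := by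
  unfold pvShl1
  exact_mod_cast (Int.natCast_shiftLeft 1 i.toNat).symm

theorem pv_S_fold (idx : List Int) (h : ∀ i ∈ idx, 0 ≤ i) (a : Nat) :
    idx.foldl (fun S i => PySem.Int.bor S (pvShl1 i)) (a : Int) = ((a ||| pvOrM idx : Nat) : Int) := by
  induction idx generalizing a with
  | nil => simp [pvOrM]
  | cons i t ih =>
    simp only [List.foldl_cons, pvOrM, List.foldr_cons]
    rw [pv_pyShl1, PySem.Int.bor_natCast, ih (fun x hx => h x (by simp [hx]))]
    congr 1
    apply Nat.eq_of_testBit_eq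
    intro j
    simp [Nat.testBit_or, Bool.or_assoc, pvOrM]



theorem pv_inner_getD (s : List Int) (b : Nat) (d : PySem.Dict Int Int) (G : Int → Nat)
    (hd : ∀ y, d.getD y 0 = ((G y : Nat) : Int)) (y : Int) :
    (s.foldl (fun d x => d.insert x (PySem.Int.bor (d.getD x 0) ((b : Nat) : Int))) d).getD y 0
      = ((if y ∈ s then G y ||| b else G y : Nat) : Int) := by
  induction s generalizing d G with
  | nil => simpa using hd y
  | cons x t ih =>
    simp only [List.foldl_cons]
    rw [ih (d.insert x (PySem.Int.bor (d.getD x 0) (b : Int)))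
        (fun z => if z = x then G z ||| b else G z) ?_ ]
    · by_cases hyx : y = x
      · subst hyx
        by_cases hyt : y ∈ t <;> simp [hyt]
      · by_cases hyt : y ∈ t <;> simp [hyt, hyx]
    · intro z
      rw [PySem.Dict.getD_insert]
      by_cases hz : z = x
      · simp [hz, hd x, PySem.Int.bor_natCast]
      · simp [hz, hd z]

def pvStep (d : PySem.Dict Int Int) (is : Int × List Int) : PySem.Dict Int Int :=
  let bit : Int := pvShl1 is.1
  is.2.foldl (fun d x => d.insert x (PySem.Int.bor (d.getD x 0) bit)) d

theorem pv_build_getD (t : List (List Int)) (i0 : Nat) (d : PySem.Dict Int Int) (G : Int → Nat)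
    (hd : ∀ y, d.getD y 0 = ((G y : Nat) : Int)) (y : Int) :
    ((PySem.List.enumerate t (i0 : Int)).foldl pvStep d).getD y 0
      = ((G y ||| pvMval t i0 y : Nat) : Int) := by
  induction t generalizing i0 d G with
  | nil => simp [PySem.List.enumerate, pvMval, hd y]
  | cons s t ih =>
    have hcons : PySem.List.enumerate (s :: t) (i0 : Int) = ((i0 : Int), s) :: PySem.List.enumerate t ((i0 : Int) + 1) := by
      simp [PySem.List.enumerate]
    rw [hcons]
    simp only [List.foldl_cons]
    have h1 : ((i0 : Int) + 1) = ((i0 + 1 : Nat) : Int) := by push_cast; ring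
    rw [h1, ih (i0 + 1) (pvStep d ((i0 : Int), s))
        (fun z => if z ∈ s then G z ||| (1 <<< i0) else G z) ?_]
    · simp only [pvMval]
      by_cases hys : y ∈ s <;> by_cases hyt : (pvMval t (i0+1) y) = 0
      all_goals {
        simp only [hys, if_true, if_false]
        congr 1
        apply Nat.eq_of_testBit_eq
        intro j
        simp [Nat.testBit_or, Bool.or_assoc]
      }
    · intro z
      unfold pvStep
      have hb : pvShl1 ((i0 : Nat) : Int) = ((1 <<< i0 : Nat) : Int) := by
        rw [pv_pyShl1, Int.toNat_natCast]
      simp only [hb]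
      exact pv_inner_getD s (1 <<< i0) d G hd z

theorem pv_build_keys (t : List (List Int)) (i0 : Int) (d : PySem.Dict Int Int) :
    ((PySem.List.enumerate t i0).foldl pvStep d).keys = PySem.Set.update d.keys t.flatten := by
  induction t generalizing i0 d with
  | nil => simp [PySem.List.enumerate, PySem.Set.update]
  | cons s t ih =>
    have hcons : PySem.List.enumerate (s :: t) i0 = (i0, s) :: PySem.List.enumerate t (i0 + 1) := by
      simp [PySem.List.enumerate]
    rw [hcons]
    simp only [List.foldl_cons, List.flatten_cons]
    rw [ih, PySem.Set.update_append]
    congr 1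
    exact PySem.Dict.keys_foldl_insert s _ d

theorem pv_mem_foldl_update (l : List Int) (g : Int → List Int) (s : PySem.Set Int) (y : Int) :
    y ∈ l.foldl (fun s i => PySem.Set.update s (g i)) s ↔ y ∈ s ∨ ∃ i ∈ l, y ∈ g i := by
  induction l generalizing s with
  | nil => simp
  | cons i t ih =>
    simp only [List.foldl_cons, ih, PySem.Set.mem_update]
    constructor
    · rintro ((h|h) | ⟨j, hj, hm⟩)
      · exact Or.inl h
      · exact Or.inr ⟨i, by simp, h⟩
      · exact Or.inr ⟨j, by simp [hj], hm⟩
    · rintro (h | ⟨j, hj, hm⟩)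
      · exact Or.inl (Or.inl h)
      · rcases List.mem_cons.mp hj with rfl | hj
        · exact Or.inl (Or.inr hm)
        · exact Or.inr ⟨j, hj, hm⟩

theorem pv_nodup_foldl_update (l : List Int) (g : Int → List Int) (s : PySem.Set Int)
    (hs : s.Nodup) : (l.foldl (fun s i => PySem.Set.update s (g i)) s).Nodup := by
  induction l generalizing s with
  | nil => exact hs
  | cons i t ih => exact ih _ (PySem.Set.nodup_update s (g i) hs)


theorem pv_sum_ite_one (L : List Int) (hL : L.Nodup) (x : Int) :
    ((L.map (fun k => if x = k then (1 : Int) else 0)).sum) = if x ∈ L then 1 else 0 := by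
  induction L with
  | nil => simp
  | cons a t ih =>
    have ht : t.Nodup := hL.of_cons
    simp only [List.map_cons, List.sum_cons, ih ht, List.mem_cons]
    by_cases hxa : x = a
    · subst hxa
      have : x ∉ t := (List.nodup_cons.mp hL).1
      simp [this]
    · simp [hxa]

theorem pv_sum_count (vs : List Int) (q : Int → Bool) (D : List Int) (hD : D.Nodup)
    (hcov : ∀ v ∈ vs, v ∈ D) :
    (((D.filter q).map (fun k => ((vs.count k : Nat) : Int))).sum) = ((vs.countP q : Nat) : Int) := by
  induction vs with
  | nil => simp
  | cons x t ih =>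
    have hx : x ∈ D := hcov x (by simp)
    have ihh := ih (fun v hv => hcov v (by simp [hv]))
    have hsplit : ∀ k : Int, (((x :: t).count k : Nat) : Int) = ((t.count k : Nat) : Int) + (if k = x then 1 else 0) := by
      intro k
      rw [List.count_cons]
      by_cases hkx : x = k
      · simp [hkx]
      · have : ¬ (k = x) := fun h => hkx h.symm
        simp [beq_iff_eq, hkx, this]
    calc ((D.filter q).map (fun k => (((x :: t).count k : Nat) : Int))).sum
        = ((D.filter q).map (fun k => ((t.count k : Nat) : Int) + (if k = x then 1 else 0))).sum := by
          exact congrArg List.sum (List.map_congr_left (fun k _ => hsplit k))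
      _ = ((D.filter q).map (fun k => ((t.count k : Nat) : Int))).sum
          + ((D.filter q).map (fun k => if k = x then (1:Int) else 0)).sum := by
          rw [← List.sum_map_add]
      _ = ((t.countP q : Nat) : Int) + (if x ∈ D.filter q then 1 else 0) := by
          rw [ihh]
          congr 1
          rw [← pv_sum_ite_one (D.filter q) (hD.filter q) x]
          refine congrArg List.sum (List.map_congr_left (fun k _ => ?_))
          by_cases h : x = k
          · simp [h]
          · have h' : ¬ (k = x) := fun hh => h hh.symm
            simp [h, h']
      _ = (((x :: t).countP q : Nat) : Int) := by
          rw [List.countP_cons]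
          by_cases hq : q x
          · simp [List.mem_filter, hx, hq]
          · simp [List.mem_filter, hq]

theorem pv_mem_flatten_getD (ls : List (List Int)) (y : Int) :
    y ∈ ls.flatten ↔ ∃ k, k < ls.length ∧ y ∈ ls.getD k [] := by
  rw [List.mem_flatten]
  constructor
  · rintro ⟨l, hl, hy⟩
    obtain ⟨k, hk, rfl⟩ := List.mem_iff_getElem.mp hl
    exact ⟨k, hk, by rwa [List.getD_eq_getElem ls [] hk]⟩
  · rintro ⟨k, hk, hy⟩
    exact ⟨ls[k], List.getElem_mem hk, by rwa [List.getD_eq_getElem ls [] hk] at hy⟩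


def pvAVal (ls : List (List Int)) (idx : List Int) : Int :=
  let p := (PySem.List.pyRange 0 (PySem.List.len ls)).foldl
    (fun (p : PySem.Set Int × PySem.Set Int) i =>
      if i ∈ idx then
        (PySem.Set.update p.1 (PySem.List.pyGetD ls i []), p.2)
      else
        (p.1, PySem.Set.update p.2 (PySem.List.pyGetD ls i [])))
    (PySem.Set.empty, PySem.Set.empty)
  PySem.Set.len (PySem.Set.diff p.1 p.2)

def pvMask (ls : List (List Int)) : PySem.Dict Int Int :=
  (PySem.List.enumerate ls).foldl pvStep PySem.Dict.empty

def pvBVal (ls : List (List Int)) (idx : List Int) : Int :=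
  let S : Int := idx.foldl (fun S i => PySem.Int.bor S (pvShl1 i)) 0
  (PySem.Dict.counter (pvMask ls).values).items.foldl
    (fun acc mc => if PySem.Int.band mc.1 S = mc.1 then acc + mc.2 else acc) 0

-- A-side: incl and excl as filtered folds
theorem pv_a_val_eq (ls : List (List Int)) (idx : List Int) :
    pvAVal ls idx =
      ((((PySem.List.pyRange 0 (ls.length : Int)).filter (fun i => decide (i ∈ idx))).foldl
          (fun s i => PySem.Set.update s (PySem.List.pyGetD ls i [])) []).filter
        (fun y => !(((PySem.List.pyRange 0 (ls.length : Int)).filter (fun i => decide (i ∉ idx))).foldl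
          (fun s i => PySem.Set.update s (PySem.List.pyGetD ls i [])) []).contains y)).length := by
  unfold pvAVal
  rw [PySem.List.foldl_congr_mem _ _
      (fun (p : PySem.Set Int × PySem.Set Int) i =>
        (if i ∈ idx then PySem.Set.update p.1 (PySem.List.pyGetD ls i []) else p.1,
         if i ∉ idx then PySem.Set.update p.2 (PySem.List.pyGetD ls i []) else p.2))
      _ (by intro acc x _; by_cases h : x ∈ idx <;> simp [h])]
  rw [PySem.List.foldl_prod_mk
      (f := fun (s : PySem.Set Int) i => if i ∈ idx then PySem.Set.update s (PySem.List.pyGetD ls i []) else s)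
      (g := fun (s : PySem.Set Int) i => if i ∉ idx then PySem.Set.update s (PySem.List.pyGetD ls i []) else s)]
  rw [PySem.List.foldl_ite_eq_foldl_filter, PySem.List.foldl_ite_eq_foldl_filter]
  rfl

theorem pv_mask_keys (ls : List (List Int)) :
    (pvMask ls).keys = PySem.Set.ofList ls.flatten := by
  unfold pvMask
  rw [pv_build_keys, PySem.Dict.keys_empty, PySem.Set.update_nil_left]

theorem pv_mask_getD (ls : List (List Int)) (y : Int) :
    (pvMask ls).getD y 0 = ((pvMval ls 0 y : Nat) : Int) := by
  unfold pvMask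
  have h := pv_build_getD ls 0 PySem.Dict.empty (fun _ => 0)
    (fun y => by simp [PySem.Dict.getD_empty]) y
  simpa using h

theorem pv_mask_values (ls : List (List Int)) :
    (pvMask ls).values = (PySem.Set.ofList ls.flatten).map (fun k => ((pvMval ls 0 k : Nat) : Int)) := by
  have hnd : (pvMask ls).keys.Nodup := by rw [pv_mask_keys]; exact PySem.Set.nodup_ofList _
  unfold PySem.Dict.values
  rw [PySem.Dict.items_eq_map_keys _ hnd 0, pv_mask_keys, List.map_map]
  exact List.map_congr_left (fun k _ => pv_mask_getD ls k)

theorem pv_b_val_eq (ls : List (List Int)) (idx : List Int) (hidx : ∀ i ∈ idx, 0 ≤ i) :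
    pvBVal ls idx =
      (((PySem.Set.ofList ls.flatten).filter
        (fun y => decide (pvMval ls 0 y &&& pvOrM idx = pvMval ls 0 y))).length : Int) := by
  unfold pvBVal
  have hS := pv_S_fold idx hidx 0
  simp only [Nat.cast_zero, Nat.zero_or] at hS
  rw [hS]
  rw [PySem.List.foldl_ite_eq_foldl_filter
      (fun mc => PySem.Int.band mc.1 ((pvOrM idx : Nat) : Int) = mc.1)
      (fun acc (mc : Int × Int) => acc + mc.2)]
  rw [PySem.List.foldl_add
      (List.filter (fun x => decide (PySem.Int.band x.1 ((pvOrM idx : Nat) : Int) = x.1))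
        (PySem.Dict.counter (pvMask ls).values).items) Prod.snd 0]
  rw [PySem.Dict.items_counter]
  rw [List.filter_map, List.map_map]
  set vs := (pvMask ls).values with hvs
  have hq : ∀ k : Int, ((fun mc : Int × Int => decide (PySem.Int.band mc.1 ((pvOrM idx : Nat) : Int) = mc.1)) ∘
      (fun k => (k, ((vs.count k : Nat) : Int)))) k = decide (PySem.Int.band k ((pvOrM idx : Nat) : Int) = k) := by
    intro k; rfl
  rw [List.filter_congr (fun k _ => hq k)]
  have hsum := pv_sum_count vs (fun k => decide (PySem.Int.band k ((pvOrM idx : Nat) : Int) = k))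
      (PySem.Set.ofList vs) (PySem.Set.nodup_ofList vs) (fun v hv => (PySem.Set.mem_ofList vs v).mpr hv)
  rw [(by rfl : ((fun mc : Int × Int => mc.2) ∘ (fun k : Int => (k, ((vs.count k : Nat) : Int)))) = (fun k : Int => ((vs.count k : Nat) : Int)))]
  rw [hsum]
  rw [hvs, pv_mask_values, List.countP_map]
  have : ((fun k => decide (PySem.Int.band k ((pvOrM idx : Nat) : Int) = k)) ∘
      (fun k : Int => ((pvMval ls 0 k : Nat) : Int)))
      = (fun y : Int => decide (pvMval ls 0 y &&& pvOrM idx = pvMval ls 0 y)) := by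
    funext y
    simp only [Function.comp, PySem.Int.band_natCast]
    by_cases h : pvMval ls 0 y &&& pvOrM idx = pvMval ls 0 y
    · simp [h]
    · have h' : ¬ ((pvMval ls 0 y &&& pvOrM idx : Nat) : Int) = ((pvMval ls 0 y : Nat) : Int) := by
        intro hc; exact h (by exact_mod_cast hc)
      simp [h, h']
  rw [this, List.countP_eq_length_filter]
  simp

theorem pv_key (ls : List (List Int)) (idx : List Int)
    (hsub : idx.Sublist (PySem.List.pyRange 0 (ls.length : Int))) :
    pvAVal ls idx = pvBVal ls idx := by
  have hbound : ∀ i ∈ idx, 0 ≤ i ∧ i < (ls.length : Int) := by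
    intro i hi
    exact PySem.List.mem_pyRange_one.mp (hsub.subset hi)
  rw [pv_a_val_eq, pv_b_val_eq ls idx (fun i hi => (hbound i hi).1)]
  set incl := ((PySem.List.pyRange 0 (ls.length : Int)).filter (fun i => decide (i ∈ idx))).foldl
      (fun s i => PySem.Set.update s (PySem.List.pyGetD ls i [])) [] with hincl
  set excl := ((PySem.List.pyRange 0 (ls.length : Int)).filter (fun i => decide (i ∉ idx))).foldl
      (fun s i => PySem.Set.update s (PySem.List.pyGetD ls i [])) [] with hexcl
  have hmem : ∀ (P : Int → Prop) [DecidablePred P] (y : Int),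
      (y ∈ ((PySem.List.pyRange 0 (ls.length : Int)).filter (fun i => decide (P i))).foldl
        (fun s i => PySem.Set.update s (PySem.List.pyGetD ls i [])) [])
      ↔ ∃ k, k < ls.length ∧ P (k : Int) ∧ y ∈ ls.getD k [] := by
    intro P _ y
    rw [pv_mem_foldl_update]
    simp only [List.not_mem_nil, false_or]
    constructor
    · rintro ⟨i, hi, hy⟩
      have hmf := List.mem_filter.mp hi
      have hb := PySem.List.mem_pyRange_one.mp hmf.1
      have hP := of_decide_eq_true hmf.2
      have hcast : i = ((i.toNat : Nat) : Int) := by omega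
      refine ⟨i.toNat, by omega, by rwa [← hcast], ?_⟩
      rw [hcast, PySem.List.pyGetD_natCast] at hy
      exact hy
    · rintro ⟨k, hk, hP, hy⟩
      refine ⟨(k : Int), List.mem_filter.mpr ⟨PySem.List.mem_pyRange_one.mpr
        ⟨by positivity, by exact_mod_cast hk⟩, decide_eq_true hP⟩, ?_⟩
      rw [PySem.List.pyGetD_natCast]
      exact hy
  have hndI : incl.Nodup := pv_nodup_foldl_update _ _ [] List.nodup_nil
  have hlen : (incl.filter (fun y => !excl.contains y)).length
      = ((PySem.Set.ofList ls.flatten).filter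
          (fun y => decide (pvMval ls 0 y &&& pvOrM idx = pvMval ls 0 y))).length := by
    apply List.Perm.length_eq
    rw [List.perm_ext_iff_of_nodup (hndI.filter _) ((PySem.Set.nodup_ofList _).filter _)]
    intro a
    rw [List.mem_filter, List.mem_filter]
    have hc : ((!excl.contains a) = true) ↔ a ∉ excl := by
      simp
    rw [hc, hincl, hexcl, hmem (fun i => i ∈ idx) a, hmem (fun i => i ∉ idx) a]
    have hq : (decide (pvMval ls 0 a &&& pvOrM idx = pvMval ls 0 a) = true)
        ↔ ∀ k, k < ls.length → a ∈ ls.getD k [] → (k : Int) ∈ idx := by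
      rw [decide_eq_true_iff, pv_and_eq_self_iff]
      constructor
      · intro h k hk ha
        have := h k ((pv_testBit_mval ls 0 a k).mpr ⟨k, hk, by omega, ha⟩)
        exact (pv_testBit_orM idx (fun i hi => (hbound i hi).1) k).mp this
      · intro h j hj
        obtain ⟨k, hk, hjk, ha⟩ := (pv_testBit_mval ls 0 a j).mp hj
        have hkj : j = k := by omega
        subst hkj
        exact (pv_testBit_orM idx (fun i hi => (hbound i hi).1) j).mpr (h j hk ha)
    rw [hq, PySem.Set.mem_ofList, pv_mem_flatten_getD]
    constructor
    · rintro ⟨⟨k, hk, hki, ha⟩, hnx⟩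
      refine ⟨⟨k, hk, ha⟩, ?_⟩
      intro k' hk' ha'
      by_contra hni
      exact hnx ⟨k', hk', hni, ha'⟩
    · rintro ⟨⟨k, hk, ha⟩, hall⟩
      refine ⟨⟨k, hk, hall k hk ha, ha⟩, ?_⟩
      rintro ⟨k', hk', hni, ha'⟩
      exact hni (hall k' hk' ha')
  exact_mod_cast congrArg (fun m : Nat => (m : Int)) hlen

theorem pv_a_flat (ls : List (List Int)) :
    inclusions ls = (PySem.List.pyRange 1 ((ls.length : Int) + 1)).flatMap
      (fun r => (PySem.List.combinations (PySem.List.pyRange 0 (ls.length : Int)) r.toNat).map (pvAVal ls)) := by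
  unfold inclusions
  simp only [PySem.List.foldl_append_singleton_eq_map, PySem.List.foldl_append_eq_flatMap]
  rfl

theorem pv_b_flat (ls : List (List Int)) :
    inclusions_alt ls = (PySem.List.pyRange 1 ((ls.length : Int) + 1)).flatMap
      (fun r => (PySem.List.combinations (PySem.List.pyRange 0 (ls.length : Int)) r.toNat).map (pvBVal ls)) := by
  unfold inclusions_alt
  simp only [PySem.Dict.foldl_insert_getD_add_one_eq_counter,
    PySem.List.foldl_append_singleton_eq_map, PySem.List.foldl_append_eq_flatMap]
  rfl

theorem pv_main (ls : List (List Int)) : inclusions ls = inclusions_alt ls := by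
  rw [pv_a_flat, pv_b_flat]
  unfold List.flatMap
  refine congrArg _ (List.map_congr_left ?_)
  intro r _
  refine List.map_congr_left ?_
  intro idx hidx
  exact pv_key ls idx (PySem.List.sublist_of_mem_combinations hidx)

-- ===== VERDICT (by name: the statement is the Claim_ definition above) =====
theorem inclusions_spec : Claim_equal_inclusions := by
  intro ls _
  unfold Spec_inclusions
  exact pv_main ls
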